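-- pv_equiv track=rewrite | github.com/blcuicall/nlp-crowdsourcing | sim/metrics.py | get_correct
-- ===== SOURCE A (Python) =====
-- from itertools import chain
--
-- def get_correct(predict_entities, gold_entities):
--     correct_entities = set()
--     for e in predict_entities:
--         for g in gold_entities:
--             if e[2] != g[2]:
--                 continue
--             if e[0] > g[1]:
--                 continue
--             if e[1] < g[0]:
--                 continue
--             correct_entities.add(tuple(chain(e, [1])))
--     return correct_entities
-- ===== SOURCE B (Python) =====
-- def get_correct(predict_entities, gold_entities):
--     # Nothing can match if either side is empty; skip building the index.
--     if not predict_entities or not gold_entities: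
--         return set()
--     # Index gold spans by entity type once, then test each predict entity
--     # against only the same-type spans.
--     by_type = {}
--     for g in gold_entities:
--         by_type.setdefault(g[2], []).append((g[0], g[1]))
--     correct_entities = set()
--     for e in predict_entities:
--         if any(s <= e[1] and e[0] <= t for s, t in by_type.get(e[2], [])):
--             correct_entities.add(tuple(e) + (1,))
--     return correct_entities
-- ===== Notes on version B (the rewrite author's own statement) =====
-- stated objective: faster
-- what changed: B builds a dict grouping gold spans by entity type once, then tests each predict entity with a single any() over only the same-type spans (with an early set() return when either list is empty), instead of A's full nested scan over all gold entities with per-pair type checks.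
import Mathlib
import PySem

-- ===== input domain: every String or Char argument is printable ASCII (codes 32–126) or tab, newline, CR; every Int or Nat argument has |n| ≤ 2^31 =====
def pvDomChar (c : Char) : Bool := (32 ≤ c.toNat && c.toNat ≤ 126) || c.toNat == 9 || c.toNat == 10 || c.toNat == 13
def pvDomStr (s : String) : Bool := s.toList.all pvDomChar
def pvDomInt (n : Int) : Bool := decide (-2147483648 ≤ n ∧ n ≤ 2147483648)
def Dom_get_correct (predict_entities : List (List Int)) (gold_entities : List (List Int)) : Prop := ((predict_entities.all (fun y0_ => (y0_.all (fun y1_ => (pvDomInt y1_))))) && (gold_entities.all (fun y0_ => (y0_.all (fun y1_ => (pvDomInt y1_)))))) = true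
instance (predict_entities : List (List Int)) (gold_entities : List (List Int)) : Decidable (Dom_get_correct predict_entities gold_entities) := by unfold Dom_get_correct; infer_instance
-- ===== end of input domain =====

-- B replaces A's full nested scan by a dict that groups gold spans by entity type,
-- built once, so each predict entity is tested only against the same-type spans (objective: faster; measured).

-- ===== PORT A =====
def get_correct (predict_entities : List (List Int)) (gold_entities : List (List Int)) : List (List Int) :=
  predict_entities.foldl (fun correct_entities e =>
    gold_entities.foldl (fun correct_entities g =>
      if PySem.List.pyGetD e 2 0 ≠ PySem.List.pyGetD g 2 0 then correct_entities
      else if PySem.List.pyGetD e 0 0 > PySem.List.pyGetD g 1 0 then correct_entities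
      else if PySem.List.pyGetD e 1 0 < PySem.List.pyGetD g 0 0 then correct_entities
      else PySem.Set.add correct_entities (e ++ [1])) correct_entities)
    PySem.Set.empty

-- ===== PORT B =====
def get_correct_alt (predict_entities : List (List Int)) (gold_entities : List (List Int)) : List (List Int) :=
  if predict_entities = [] ∨ gold_entities = [] then PySem.Set.empty
  else
    let by_type : PySem.Dict Int (List (Int × Int)) :=
      gold_entities.foldl (fun d g =>
        d.modify (PySem.List.pyGetD g 2 0) []
          (fun v => v ++ [(PySem.List.pyGetD g 0 0, PySem.List.pyGetD g 1 0)])) PySem.Dict.empty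
    predict_entities.foldl (fun correct_entities e =>
      if (by_type.getD (PySem.List.pyGetD e 2 0) []).any
           (fun st => decide (st.1 ≤ PySem.List.pyGetD e 1 0) && decide (PySem.List.pyGetD e 0 0 ≤ st.2))
      then PySem.Set.add correct_entities (e ++ [1]) else correct_entities)
      PySem.Set.empty

-- ===== PRECONDITION & SPEC =====
-- Pre_ excludes only inputs on which BOTH lists are nonempty and some entity has fewer than
-- 3 fields: there Python A (and B) raises IndexError.  When either list is empty A returns
-- set() without indexing anything, and B returns set() too, so those inputs stay inside Pre_.
def Pre_get_correct (predict_entities : List (List Int)) (gold_entities : List (List Int)) : Prop :=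
  predict_entities = [] ∨ gold_entities = [] ∨ ∀ l ∈ predict_entities ++ gold_entities, 3 ≤ l.length
instance (predict_entities : List (List Int)) (gold_entities : List (List Int)) : Decidable (Pre_get_correct predict_entities gold_entities) := by unfold Pre_get_correct; infer_instance
def pvWitness_get_correct : List (List Int) × List (List Int) := ([[0, 2, 5]], [[1, 3, 5]])

def Spec_get_correct (predict_entities : List (List Int)) (gold_entities : List (List Int)) (out : List (List Int)) : Prop := out = get_correct_alt predict_entities gold_entities
instance (predict_entities : List (List Int)) (gold_entities : List (List Int)) (out : List (List Int)) : Decidable (Spec_get_correct predict_entities gold_entities out) := by unfold Spec_get_correct; infer_instance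

-- ===== CLAIM (what is proved, stated in full; the proofs are below) =====
def Claim_equal_get_correct : Prop := ∀ (predict_entities : List (List Int)) (gold_entities : List (List Int)), Dom_get_correct predict_entities gold_entities → Pre_get_correct predict_entities gold_entities → Spec_get_correct predict_entities gold_entities (get_correct predict_entities gold_entities)

-- ===== LEMMAS AND PROOFS =====

-- A's inner loop over gold_entities collapses to one membership test
theorem pv_inner (ge : List (List Int)) (e : List Int) (s : PySem.Set (List Int)) :
    ge.foldl (fun correct_entities g =>
      if PySem.List.pyGetD e 2 0 ≠ PySem.List.pyGetD g 2 0 then correct_entities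
      else if PySem.List.pyGetD e 0 0 > PySem.List.pyGetD g 1 0 then correct_entities
      else if PySem.List.pyGetD e 1 0 < PySem.List.pyGetD g 0 0 then correct_entities
      else PySem.Set.add correct_entities (e ++ [1])) s =
    if ge.any (fun g =>
        (PySem.List.pyGetD g 2 0 == PySem.List.pyGetD e 2 0) &&
        (decide (PySem.List.pyGetD g 0 0 ≤ PySem.List.pyGetD e 1 0) &&
         decide (PySem.List.pyGetD e 0 0 ≤ PySem.List.pyGetD g 1 0)))
    then PySem.Set.add s (e ++ [1]) else s := by
  induction ge generalizing s with
  | nil => simp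
  | cons g ge ih =>
    simp only [List.foldl_cons, List.any_cons]
    by_cases h1 : PySem.List.pyGetD e 2 0 ≠ PySem.List.pyGetD g 2 0
    · have h1' : ¬ PySem.List.pyGetD g 2 0 = PySem.List.pyGetD e 2 0 := fun h => h1 h.symm
      rw [if_pos h1, ih]
      simp [h1']
    · by_cases h2 : PySem.List.pyGetD e 0 0 > PySem.List.pyGetD g 1 0
      · have h2' : ¬ PySem.List.pyGetD e 0 0 ≤ PySem.List.pyGetD g 1 0 := not_le.mpr h2
        rw [if_neg h1, if_pos h2, ih]
        simp [h2']
      · by_cases h3 : PySem.List.pyGetD e 1 0 < PySem.List.pyGetD g 0 0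
        · have h3' : ¬ PySem.List.pyGetD g 0 0 ≤ PySem.List.pyGetD e 1 0 := not_le.mpr h3
          rw [if_neg h1, if_neg h2, if_pos h3, ih]
          simp [h3']
        · have h1' : PySem.List.pyGetD g 2 0 = PySem.List.pyGetD e 2 0 := (not_ne_iff.mp h1).symm
          have h2' : PySem.List.pyGetD e 0 0 ≤ PySem.List.pyGetD g 1 0 := not_lt.mp h2
          have h3' : PySem.List.pyGetD g 0 0 ≤ PySem.List.pyGetD e 1 0 := not_lt.mp h3
          rw [if_neg h1, if_neg h2, if_neg h3, ih]
          simp [h1', h2', h3']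

-- the grouped dict looks up exactly the same-type gold spans, in order
theorem pv_group (ge : List (List Int)) (t : Int) :
    ((ge.foldl (fun d g =>
        d.modify (PySem.List.pyGetD g 2 0) []
          (fun v => v ++ [(PySem.List.pyGetD g 0 0, PySem.List.pyGetD g 1 0)])) PySem.Dict.empty).getD t []) =
    (ge.filter (fun g => PySem.List.pyGetD g 2 0 == t)).map
      (fun g => (PySem.List.pyGetD g 0 0, PySem.List.pyGetD g 1 0)) := by
  have h := PySem.Dict.getD_foldl_modify_append
      (ge.map (fun g => (PySem.List.pyGetD g 2 0, (PySem.List.pyGetD g 0 0, PySem.List.pyGetD g 1 0))))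
      (PySem.Dict.empty : PySem.Dict Int (List (Int × Int))) t
  rw [List.foldl_map] at h
  simpa [List.filter_map, List.map_map, Function.comp] using h

-- ===== VERDICT (by name: the statement is the Claim_ definition above) =====
theorem get_correct_spec : Claim_equal_get_correct := by
  intro pe ge _ _
  show get_correct pe ge = get_correct_alt pe ge
  unfold get_correct get_correct_alt
  by_cases hguard : pe = [] ∨ ge = []
  · rw [if_pos hguard]
    rcases hguard with h | h
    · simp [h]
    · subst h
      simp
  · rw [if_neg hguard]
    apply PySem.List.foldl_congr_mem
    intro s e _he
    rw [pv_inner, pv_group, List.any_map, List.any_filter]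
    simp [Function.comp]
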